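-- pv_equiv track=rewrite | github.com/louis49/ml-sonets | twomodels/data.py | convertir_rimes_en_lettres
-- ===== SOURCE A (Python) =====
-- def convertir_rimes_en_lettres(sequence_rimes):
--     lettres = []
--     map_rimes = {}
--     courant_lettre = 65
--
--     for rime in sequence_rimes:
--         if rime not in map_rimes:
--             map_rimes[rime] = chr(courant_lettre)
--             courant_lettre += 1
--         lettres.append(map_rimes[rime])
--
--     return ''.join(lettres)
-- ===== SOURCE B (Python) =====
-- def convertir_rimes_en_lettres(sequence_rimes):
--     seq = list(sequence_rimes)
--     return ''.join(chr(65 + len(set(seq[:seq.index(r)]))) for r in seq)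
-- ===== Notes on version B (the rewrite author's own statement) =====
-- stated objective: alternative
-- what changed: Drops A's stateful loop (incrementally built dict + letter counter) for a per-position closed form: each rhyme's letter is chr(65 + number of distinct rhymes strictly before its first occurrence), computed independently with index/slice/set; this trades A's linear time for a quadratic but stateless formulation.
import Mathlib
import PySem

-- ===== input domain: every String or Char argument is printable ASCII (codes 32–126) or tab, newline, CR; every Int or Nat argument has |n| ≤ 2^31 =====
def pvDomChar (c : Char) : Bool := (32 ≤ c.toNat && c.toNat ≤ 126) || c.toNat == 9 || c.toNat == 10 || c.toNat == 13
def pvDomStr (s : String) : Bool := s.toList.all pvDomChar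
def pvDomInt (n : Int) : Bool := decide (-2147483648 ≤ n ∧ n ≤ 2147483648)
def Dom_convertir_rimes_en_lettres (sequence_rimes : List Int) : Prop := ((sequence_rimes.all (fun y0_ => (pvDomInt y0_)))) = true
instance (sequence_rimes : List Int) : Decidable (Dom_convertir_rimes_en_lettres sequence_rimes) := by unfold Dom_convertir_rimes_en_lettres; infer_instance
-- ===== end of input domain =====

-- B replaces A's stateful loop (incrementally built dict + letter counter) by a
-- per-position closed form: letter(r) = chr(65 + |set(seq[:seq.index(r)])|);
-- objective: alternative (stateless but quadratic, not faster).

-- ===== PORT A =====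
-- state = (lettres, map_rimes, courant_lettre); map_rimes[rime] after the conditional
-- insert is always present, so the lookup's .getD 'A' default is never used.
def convertir_rimes_en_lettres (sequence_rimes : List Int) : String :=
  let st := sequence_rimes.foldl
    (fun (st : List Char × PySem.Dict Int Char × Int) rime =>
      let st' :=
        if st.2.1.contains rime = true then (st.2.1, st.2.2)
        else (st.2.1.insert rime (Char.ofNat st.2.2.toNat), st.2.2 + 1)
      (st.1 ++ [(st'.1.get? rime).getD 'A'], st'.1, st'.2))
    ([], PySem.Dict.empty, 65)
  String.ofList st.1

-- ===== PORT B =====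
-- seq = list(...); ''.join(chr(65 + len(set(seq[:seq.index(r)]))) for r in seq).
-- seq.index(r) always succeeds (r ∈ seq), so the .getD 0 default is never used;
-- seq[:j] is PySem.List.slice seq none (some j).
def convertir_rimes_en_lettres_alt (sequence_rimes : List Int) : String :=
  let seq := sequence_rimes
  String.ofList (seq.map (fun r =>
    Char.ofNat (65 + (PySem.Set.ofList
      (PySem.List.slice seq none (some (((PySem.List.index? seq r).getD 0 : Nat) : Int)))).length)))

-- ===== PRECONDITION & SPEC =====
def Spec_convertir_rimes_en_lettres (sequence_rimes : List Int) (out : String) : Prop := out = convertir_rimes_en_lettres_alt sequence_rimes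
instance (sequence_rimes : List Int) (out : String) : Decidable (Spec_convertir_rimes_en_lettres sequence_rimes out) := by unfold Spec_convertir_rimes_en_lettres; infer_instance

-- ===== CLAIM (what is proved, stated in full; the proofs are below) =====
def Claim_equal_convertir_rimes_en_lettres : Prop := ∀ (sequence_rimes : List Int), Dom_convertir_rimes_en_lettres sequence_rimes → Spec_convertir_rimes_en_lettres sequence_rimes (convertir_rimes_en_lettres sequence_rimes)

-- ===== LEMMAS AND PROOFS =====

-- the letter table over a distinct list `ds`: rime ↦ chr(65 + position)
def pvDmap (ds : List Int) : PySem.Dict Int Char :=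
  PySem.Dict.mk ((PySem.List.enumerate ds 0).map (fun p => (p.2, Char.ofNat (65 + p.1).toNat)))

theorem pvDmap_get?_gen (ds : List Int) : ∀ (s r : Int),
    (PySem.Dict.mk ((PySem.List.enumerate ds s).map
        (fun p => (p.2, Char.ofNat (65 + p.1).toNat)))).get? r
      = (PySem.List.index? ds r).map (fun i : Nat => Char.ofNat (65 + s + i).toNat) := by
  induction ds with
  | nil => intro s r; simp [PySem.List.enumerate_nil, PySem.Dict.get?, PySem.List.index?]
  | cons x xs ih =>
    intro s r
    rw [PySem.List.enumerate_cons, List.map_cons, PySem.Dict.get?_mk_cons]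
    by_cases hx : x = r
    · subst hx
      rw [PySem.List.index?_cons_self]
      simp
    · rw [PySem.List.index?_cons_of_ne xs hx, Option.map_map]
      rw [if_neg (by simp [hx]), ih (s + 1) r]
      cases PySem.List.index? xs r with
      | none => rfl
      | some i =>
        simp only [Option.map_some, Function.comp_apply]
        congr 2
        omega

theorem pvDmap_contains (ds : List Int) (r : Int) :
    (pvDmap ds).contains r = decide (r ∈ ds) := by
  rw [pvDmap, PySem.Dict.contains_eq_decide_mem_keys]
  simp [PySem.Dict.keys_mk, List.map_map, Function.comp_def, PySem.List.map_snd_enumerate]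

theorem pvDmap_insert (ds : List Int) (r : Int) (h : r ∉ ds) :
    (pvDmap ds).insert r (Char.ofNat (65 + (ds.length : Int)).toNat) = pvDmap (ds ++ [r]) := by
  apply PySem.Dict.ext
  rw [PySem.Dict.items_insert_of_not_contains]
  · simp [pvDmap, PySem.List.enumerate_append, PySem.List.enumerate_cons,
      PySem.List.enumerate_nil]
  · rw [show (pvDmap ds).contains r = decide (r ∈ ds) from pvDmap_contains ds r]
    simpa using h

-- index of a rime already present is unchanged by appending more distinct rimes
theorem index?_update (seen rs : List Int) (r : Int) (h : r ∈ seen) :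
    PySem.List.index? (PySem.Set.update seen rs) r = PySem.List.index? seen r := by
  rw [PySem.Set.update_eq_append_filter, PySem.List.index?_append_of_mem _ h]

-- main invariant for A's loop
theorem pvLoopA (rs : List Int) : ∀ (seen : List Int) (acc : List Char),
    (rs.foldl
      (fun (st : List Char × PySem.Dict Int Char × Int) rime =>
        let st' :=
          if st.2.1.contains rime = true then (st.2.1, st.2.2)
          else (st.2.1.insert rime (Char.ofNat st.2.2.toNat), st.2.2 + 1)
        (st.1 ++ [(st'.1.get? rime).getD 'A'], st'.1, st'.2))
      (acc, pvDmap seen, 65 + (seen.length : Int))).1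
    = acc ++ rs.map (fun r => (((pvDmap (PySem.Set.update seen rs)).get? r).getD 'A')) := by
  induction rs with
  | nil => intro seen acc; simp [PySem.Set.update_nil]
  | cons r rs ih =>
    intro seen acc
    rw [List.foldl_cons, PySem.Set.update_cons]
    by_cases hmem : r ∈ seen
    · have hc : (pvDmap seen).contains r = true := by
        rw [pvDmap_contains]; simpa using hmem
      simp only [hc, if_true, List.map_cons, PySem.Set.add_of_mem hmem]
      rw [ih seen (acc ++ [((pvDmap seen).get? r).getD 'A'])]
      have hr : (pvDmap (PySem.Set.update seen rs)).get? r = (pvDmap seen).get? r := by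
        rw [pvDmap, pvDmap, pvDmap_get?_gen, pvDmap_get?_gen, index?_update seen rs r hmem]
      rw [hr, List.append_assoc]; rfl
    · have hc : (pvDmap seen).contains r = false := by
        rw [pvDmap_contains]; simpa using hmem
      simp only [hc, Bool.false_eq_true, if_false, PySem.Set.add_of_not_mem hmem]
      rw [pvDmap_insert seen r hmem]
      have hlen : (65 + (seen.length : Int)) + 1 = 65 + (((seen ++ [r]).length : Nat) : Int) := by
        simp; ring
      rw [hlen, ih (seen ++ [r]) _]
      have hr : ((pvDmap (seen ++ [r])).get? r)
          = ((pvDmap (PySem.Set.update (seen ++ [r]) rs)).get? r) := by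
        rw [pvDmap, pvDmap, pvDmap_get?_gen, pvDmap_get?_gen,
          index?_update (seen ++ [r]) rs r (by simp)]
      rw [List.map_cons, hr, List.append_assoc]; rfl

-- B's closed form: the position of r in set(seq) equals |set(seq[:seq.index(r)])|
theorem pvClosedForm (seq : List Int) (r : Int) (k : Nat)
    (hk : PySem.List.index? seq r = some k) :
    PySem.List.index? (PySem.Set.ofList seq) r
      = some (PySem.Set.ofList (seq.take k)).length := by
  obtain ⟨pre, suf, hseq, hlen, hpre⟩ := (PySem.List.index?_eq_some_iff seq r k).1 hk
  subst hseq; subst hlen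
  have htake : (pre ++ r :: suf).take pre.length = pre := by
    simp
  rw [htake, PySem.Set.ofList_append, PySem.Set.update_cons,
    PySem.Set.add_of_not_mem (by simpa [PySem.Set.mem_ofList] using hpre),
    PySem.Set.update_eq_append_filter,
    PySem.List.index?_append_of_mem _ (by simp)]
  exact PySem.List.index?_append_singleton_self (PySem.Set.ofList pre) r (by simpa [PySem.Set.mem_ofList] using hpre)

-- ===== VERDICT (by name: the statement is the Claim_ definition above) =====
theorem convertir_rimes_en_lettres_spec : Claim_equal_convertir_rimes_en_lettres := by
  intro seq _
  unfold Spec_convertir_rimes_en_lettres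
  simp only [convertir_rimes_en_lettres, convertir_rimes_en_lettres_alt]
  have h0 : (PySem.Dict.empty : PySem.Dict Int Char) = pvDmap [] := rfl
  have h65 : (65 : Int) = 65 + ((([] : List Int).length : Nat) : Int) := by simp
  rw [h0, h65, pvLoopA seq [] []]
  have hup : PySem.Set.update ([] : List Int) seq = PySem.Set.ofList seq := by
    rw [PySem.Set.update_nil_left]
  rw [hup, List.nil_append]
  congr 1
  apply List.map_congr_left
  intro r hr
  obtain ⟨k, hk⟩ := Option.isSome_iff_exists.1 ((PySem.List.index?_isSome_iff seq r).2 hr)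
  rw [pvDmap, pvDmap_get?_gen, pvClosedForm seq r k hk, hk]
  rw [PySem.List.slice_to_natCast]
  simp only [Option.getD_some, Option.map_some]
  congr 1
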